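-- pv_equiv track=rewrite | github.com/michaelkulinich/SS8_assignment | mycd_python.py | clean_path_list
-- ===== SOURCE A (Python) =====
-- def clean_path_list(path_list):
--     """Updates the list representing the directory path
--
--     Args:
--         path_list: A list consisting of the directories in the path
--
--     Returns:
--         A list without single dots and two dots. If a directory is
--         non alphanumeric then it returns a list with an error message
--
--     Example:
--         clean_path_list(["home", "Documents", "..", "."]) -> ["home"]
--         clean_path_list(["home", "Do#@cuments"]) ->
--             ["Do#@cuments: No such file or directory"]
--     """
--     # if the list consists of an empty string, return empty list
--     if path_list == ['']:
--         return []
--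
--     i = 0
--     while i < len(path_list):
--         # if the index consists of a single dot
--         # then we don't do anything to change the path
--         # and remove this index from list
--         if path_list[i] == '.':
--             if i != 0:
--                 path_list.pop(i)
--                 i -= 1
--             else:
--                 path_list.pop(i)
--
--         # if the index constists of two dots
--         # then we need to step to previous directory
--         # and remove both this index and previous index from list
--         elif path_list[i] == '..':
--             if i != 0:
--                 path_list.pop(i)
--                 path_list.pop(i-1)
--                 i -=2
--
--             # if this is only element in list, just remove it and don't
--             # decrement i because i is already equal to 0
--             else:
--                 path_list.pop(i)
--
--         # this element should represent a valid directory
--         # check that is is alphanumeric, if not then update the list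
--         # to only contain an error messge
--         else:
--             if not path_list[i].isalnum():
--                 path_list = [path_list[i] + ": No such file or directory"]
--                 break
--         i += 1
--
--     return path_list
-- ===== SOURCE B (Python) =====
-- def clean_path_list(path_list):
--     # Single left-to-right pass with a stack: push valid directory names,
--     # skip '.', pop on '..', and return the error message as soon as a
--     # non-alphanumeric component is seen. (Return value only; unlike A,
--     # B does not mutate its argument in place.)
--     if path_list == ['']:
--         return []
--     stack = []
--     for tok in path_list:
--         if tok == '.':
--             continue
--         if tok == '..':
--             stack = stack[:-1]
--         elif tok.isalnum():
--             stack.append(tok)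
--         else:
--             return [tok + ": No such file or directory"]
--     return stack
-- ===== Notes on version B (the rewrite author's own statement) =====
-- stated objective: faster
-- what changed: Replaced A's in-place while-loop over a mutating list (repeated list.pop at interior indices, index stepping back and forth) with a single forward pass maintaining a stack: push valid names, skip '.', pop on '..', early-return the error message.
-- intended difference: When a '.' or '..' component is reached while the resolved path so far is empty, A's index jump (pop at index 0 then i+=1) lets the immediately following component escape every check, so A keeps a stray dot or invalid name unexamined; B processes every component, resolving or rejecting it, which is the intended behaviour. — e.g. on clean_path_list([".", "."]): A returns ["."], B returns []
import Mathlib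
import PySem

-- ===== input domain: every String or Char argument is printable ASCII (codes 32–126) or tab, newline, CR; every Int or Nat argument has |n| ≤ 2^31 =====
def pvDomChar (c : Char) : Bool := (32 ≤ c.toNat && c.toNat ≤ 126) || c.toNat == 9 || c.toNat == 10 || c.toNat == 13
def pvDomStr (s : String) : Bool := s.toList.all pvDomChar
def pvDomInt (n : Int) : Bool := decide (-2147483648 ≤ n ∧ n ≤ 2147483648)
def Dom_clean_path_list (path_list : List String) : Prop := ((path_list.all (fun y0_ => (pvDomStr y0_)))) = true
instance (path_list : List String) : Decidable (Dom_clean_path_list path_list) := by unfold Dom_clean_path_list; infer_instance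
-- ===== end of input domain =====

-- B replaces A's in-place index/while loop by a single forward pass with a stack (O(n) vs A's
-- O(n^2) of interior pops); equivalence is about the RETURN value only (A mutates its argument).

-- ===== PORT A =====
-- A's while loop: state is the (mutated) list l and the index i (a Nat: Python's i only dips
-- below 0 transiently inside an iteration; at each loop head i ≥ 0).  list.pop(k) on an
-- in-range k is List.eraseIdx k (the popped value is discarded by A).
def cplA_loop (fuel : Nat) (l : List String) (i : Nat) : List String :=
  match fuel with
  | 0 => l   -- fuel guard only: 2*len(l)+1 steps always suffice (the measure 2*len-i drops each iteration)
  | fuel + 1 =>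
    if _h : i < l.length then
      if l[i] = "." then
        if i ≠ 0 then
          -- pop(i); i -= 1; then i += 1  (net: i)
          cplA_loop fuel (l.eraseIdx i) ((i - 1) + 1)
        else
          -- pop(i); then i += 1
          cplA_loop fuel (l.eraseIdx i) (0 + 1)
      else if l[i] = ".." then
        if i ≠ 0 then
          -- pop(i); pop(i-1); i -= 2; then i += 1  (net: i - 1, exact since i ≥ 1)
          cplA_loop fuel ((l.eraseIdx i).eraseIdx (i - 1)) (i - 1)
        else
          -- pop(i); then i += 1
          cplA_loop fuel (l.eraseIdx i) (0 + 1)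
      else
        if ¬ (PySem.Str.strIsalnum l[i]) then
          -- path_list = [path_list[i] + ": No such file or directory"]; break
          [l[i] ++ ": No such file or directory"]
        else
          cplA_loop fuel l (i + 1)
    else l

def clean_path_list (path_list : List String) : List String :=
  if path_list = [""] then [] else cplA_loop (2 * path_list.length + 1) path_list 0

-- ===== PORT B =====
-- Source B's loop: stack.append t = stack ++ [t], stack.pop() = stack.dropLast.
def cplB_go (stack : List String) : List String → List String
  | [] => stack
  | tok :: rest =>
    if tok = "." then cplB_go stack rest
    else if tok = ".." then cplB_go stack.dropLast rest
    else if PySem.Str.strIsalnum tok then cplB_go (stack ++ [tok]) rest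
    else [tok ++ ": No such file or directory"]

def clean_path_list_alt (path_list : List String) : List String :=
  if path_list = [""] then [] else cplB_go [] path_list

-- ===== PRECONDITION & SPEC =====
-- cplDanger h l = true iff, resolving l on top of a stack of height h, some '.'/'..' component
-- is reached while the stack is empty and the next component is not alphanumeric (the component
-- A's i=0 index jump leaves unexamined); it stops (false) at the first invalid component, where
-- both programs return the same error message.  (headD "a": a missing next component is harmless.)
def cplDanger (h : Nat) : List String → Bool
  | [] => false
  | t :: rest =>
    if t = "." ∨ t = ".." then
      (h == 0 && !PySem.Str.strIsalnum (rest.headD "a")) ||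
        cplDanger (if t = ".." then h - 1 else h) rest
    else PySem.Str.strIsalnum t && cplDanger (h + 1) rest

-- On these inputs A's pop-at-index-0 jump skips the check of the next component, so A keeps a
-- stray '.', '..' or invalid name unexamined; B resolves/validates it, the intended behaviour.
def D_clean_path_list (path_list : List String) : Prop :=
  path_list ≠ [""] ∧ cplDanger 0 path_list = true
instance (path_list : List String) : Decidable (D_clean_path_list path_list) := by
  unfold D_clean_path_list; infer_instance

def Spec_clean_path_list (path_list : List String) (out : List String) : Prop :=
  ¬ D_clean_path_list path_list → out = clean_path_list_alt path_list
instance (path_list : List String) (out : List String) : Decidable (Spec_clean_path_list path_list out) := by unfold Spec_clean_path_list; infer_instance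

def pvDiffWitness_clean_path_list : List String := [".", "."]
def pvDiffWitnessOut_clean_path_list : (List String) × (List String) := (["."], [])

-- ===== CLAIM (what is proved, stated in full; the proofs are below) =====
def Claim_unchanged_clean_path_list : Prop := ∀ (path_list : List String), Dom_clean_path_list path_list → Spec_clean_path_list path_list (clean_path_list path_list)
def Claim_changed_clean_path_list : Prop := Dom_clean_path_list (pvDiffWitness_clean_path_list) ∧ D_clean_path_list (pvDiffWitness_clean_path_list) ∧ clean_path_list (pvDiffWitness_clean_path_list) = pvDiffWitnessOut_clean_path_list.1 ∧ clean_path_list_alt (pvDiffWitness_clean_path_list) = pvDiffWitnessOut_clean_path_list.2 ∧ pvDiffWitnessOut_clean_path_list.1 ≠ pvDiffWitnessOut_clean_path_list.2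

-- ===== LEMMAS AND PROOFS =====

theorem erase_at_length {s r : List String} {t : String} :
    (s ++ t :: r).eraseIdx s.length = s ++ r := by
  induction s with
  | nil => rfl
  | cons a s ih => simpa [List.eraseIdx] using ih

theorem erase_at_length_sub_one {s : List String} (r : List String) (hs : s ≠ []) :
    (s ++ r).eraseIdx (s.length - 1) = s.dropLast ++ r := by
  rcases (List.eq_nil_or_concat s).resolve_left hs with ⟨s', t, rfl⟩
  simpa using erase_at_length (s := s') (r := r) (t := t)

theorem danger_dot (h : Nat) (rest : List String)
    (hd : cplDanger h ("." :: rest) = false) : cplDanger h rest = false := by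
  rw [cplDanger.eq_def] at hd; simp at hd; exact hd.2

theorem danger_dd (h : Nat) (rest : List String)
    (hd : cplDanger h (".." :: rest) = false) : cplDanger (h - 1) rest = false := by
  rw [cplDanger.eq_def] at hd; simp at hd; exact hd.2

theorem danger_head (t : String) (ht : t = "." ∨ t = "..") (r : String) (rest : List String)
    (hd : cplDanger 0 (t :: r :: rest) = false) :
    PySem.Str.strIsalnum r = true ∧ cplDanger 0 (r :: rest) = false := by
  rw [cplDanger.eq_def] at hd; simp [if_pos ht] at hd
  exact ⟨by simpa using hd.1, hd.2⟩

theorem danger_push (t : String) (h : Nat) (rest : List String)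
    (ht1 : ¬ t = ".") (ht2 : ¬ t = "..") (ha : PySem.Str.strIsalnum t = true)
    (hd : cplDanger h (t :: rest) = false) : cplDanger (h + 1) rest = false := by
  rw [cplDanger.eq_def] at hd; simp [ht1, ht2] at hd
  exact hd (by simpa using ha)

-- Loop invariant: A's state (s ++ rest, |s|) behaves like B's (stack s, remaining rest),
-- provided no empty-stack '.'/'..' is followed by a non-alphanumeric component.
theorem cplA_nil (f i : Nat) : cplA_loop f [] i = [] := by
  cases f <;> simp [cplA_loop]

theorem loop_agrees_aux (f : Nat) : ∀ (rest : List String), 2 * rest.length < f → ∀ (s : List String),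
    cplDanger s.length rest = false → cplA_loop f (s ++ rest) s.length = cplB_go s rest := by
  induction f with
  | zero => intro rest hlen; omega
  | succ n ihn =>
    intro rest hlen s hD
    match rest, hlen, hD with
    | [], _, _ => simp [cplA_loop, cplB_go]
    | tok :: rest', hlen, hD =>
      have hlt : s.length < (s ++ tok :: rest').length := by simp
      have hget : (s ++ tok :: rest')[s.length]'hlt = tok := by
        simp [List.getElem_append_right]
      rw [cplA_loop]
      simp only [hlt, dif_pos, hget]
      by_cases htokdot : tok = "."
      · subst htokdot
        by_cases hs : s = []
        · subst hs
          -- i = 0 : pop then i=1, freezing the head of rest'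
          simp only [ne_eq, List.length_nil, not_true_eq_false, if_false,
            List.nil_append, List.eraseIdx_cons_zero]
          match rest', hlen, hD with
          | [], _, _ => simp [cplA_nil, cplB_go]
          | r :: rest'', hlen, hD =>
            obtain ⟨hr3, hd2⟩ := danger_head "." (Or.inl rfl) r rest'' hD
            have hr1 : ¬ r = "." := by rintro rfl; exact absurd hr3 (by decide)
            have hr2 : ¬ r = ".." := by rintro rfl; exact absurd hr3 (by decide)
            have hD'' : cplDanger 1 rest'' = false := danger_push r 0 rest'' hr1 hr2 hr3 hd2
            -- A continues at (r :: rest'', 1) = ([r] ++ rest'', |[r]|)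
            have := ihn rest'' (by simp only [List.length_cons] at hlen; omega) [r] hD''
            rw [cplB_go, cplB_go]
            simp only [if_neg hr1, if_neg hr2, if_pos hr3]
            simpa using this
        · -- i ≠ 0 : pop(i), net index i
          have hne : s.length ≠ 0 := by simpa using fun h => hs (List.eq_nil_of_length_eq_zero h)
          simp only [if_pos hne, erase_at_length]
          have h1 : s.length - 1 + 1 = s.length := by omega
          rw [h1, cplB_go]
          exact ihn rest' (by simp only [List.length_cons] at hlen; omega) s
            (danger_dot s.length rest' hD)
      · by_cases htokdd : tok = ".."
        · subst htokdd
          by_cases hs : s = []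
          · subst hs
            simp only [if_neg htokdot, ne_eq, List.length_nil, not_true_eq_false,
              if_false, List.nil_append, List.eraseIdx_cons_zero]
            match rest', hlen, hD with
            | [], _, _ => simp [cplA_nil, cplB_go, htokdot]
            | r :: rest'', hlen, hD =>
              obtain ⟨hr3, hd2⟩ := danger_head ".." (Or.inr rfl) r rest'' hD
              have hr1 : ¬ r = "." := by rintro rfl; exact absurd hr3 (by decide)
              have hr2 : ¬ r = ".." := by rintro rfl; exact absurd hr3 (by decide)
              have hD'' : cplDanger 1 rest'' = false := danger_push r 0 rest'' hr1 hr2 hr3 hd2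
              have := ihn rest'' (by simp only [List.length_cons] at hlen; omega) [r] hD''
              rw [cplB_go]
              simp only [if_neg htokdot, List.dropLast_nil]
              rw [cplB_go]
              simp only [if_neg hr1, if_neg hr2, if_pos hr3]
              simpa using this
          · have hne : s.length ≠ 0 := by simpa using fun h => hs (List.eq_nil_of_length_eq_zero h)
            simp only [if_neg htokdot, if_pos hne, erase_at_length,
              erase_at_length_sub_one rest' hs]
            have hlen' : s.length - 1 = s.dropLast.length := by
              simp [List.length_dropLast]
            have hD' := danger_dd s.length rest' hD
            rw [hlen'] at hD'
            rw [hlen', cplB_go]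
            simp only [if_neg htokdot]
            exact ihn rest' (by simp only [List.length_cons] at hlen; omega) s.dropLast hD'
        · by_cases halnum : PySem.Str.strIsalnum tok
          · -- valid directory: i += 1, which is (s ++ [tok]) with index |s ++ [tok]|
            simp only [if_neg htokdot, if_neg htokdd, halnum, not_true_eq_false, if_false]
            have hD' : cplDanger (s ++ [tok]).length rest' = false := by
              have := danger_push tok s.length rest' htokdot htokdd halnum hD
              simpa using this
            have := ihn rest' (by simp only [List.length_cons] at hlen; omega) (s ++ [tok]) hD'
            rw [cplB_go]
            simp only [if_neg htokdot, if_neg htokdd, if_pos halnum]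
            have h2 : (s ++ [tok]) ++ rest' = s ++ tok :: rest' := by simp
            have h3 : (s ++ [tok]).length = s.length + 1 := by simp
            rw [h2, h3] at this
            exact this
          · rw [cplB_go]
            have h' : PySem.Chars.strIsalnum tok.toList = false := by
              simpa using halnum
            simp [htokdot, htokdd, h']

-- ===== VERDICT (by name: the statement is the Claim_ definition above) =====
theorem clean_path_list_spec : Claim_unchanged_clean_path_list := by
  intro l _ hnD
  unfold clean_path_list clean_path_list_alt
  by_cases hl : l = [""]
  · simp [hl]
  · simp only [if_neg hl]
    have hD : cplDanger 0 l = false := by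
      by_contra h
      exact hnD ⟨hl, by simpa using h⟩
    simpa using loop_agrees_aux (2 * l.length + 1) l (by omega) [] hD

theorem clean_path_list_changed : Claim_changed_clean_path_list := by
  unfold Claim_changed_clean_path_list
  decide
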